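-- pv_equiv track=rewrite | github.com/Carole-GRD/ESA-Python | ESA - Syllabus/slide_15_les_fichiers/travail_individuel/main2.py | compter_infos_attendues
-- ===== SOURCE A (Python) =====
-- def compter_infos_attendues(infos_attendues):
--     """
--     Détermine le nombre d'informations attendues par entrée en analysant la ligne de définition dans fstab.
--
--     :param infos_attendues: (str) Chaine de caractères, extraite du fichier fstab, contenant les différentes infos.
--     :return: (int) Le nombre d'informations attendues par entrée.
--     """
--     champs = []
--     start = None  # Position du dernier '<'
--
--     # Parcourir la ligne caractère par caractère
--     for i, char in enumerate(infos_attendues):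
--         if char == '<':  # Démarrage d'un champ
--             start = i
--         elif char == '>' and start is not None:  # Fin d'un champ
--             champs.append(infos_attendues[start:i+1])  # Ajouter le champ trouvé (ex.: <file system>)
--             start = None  # Réinitialiser
--
--     return len(champs)  # Retourner le nombre de champs trouvés
-- ===== SOURCE B (Python) =====
-- def compter_infos_attendues(infos_attendues):
--     """
--     Détermine le nombre d'informations attendues par entrée en analysant la ligne de définition dans fstab.
--
--     :param infos_attendues: (str) Chaine de caractères, extraite du fichier fstab, contenant les différentes infos.
--     :return: (int) Le nombre d'informations attendues par entrée.
--     """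
--     # A '>' closes a field exactly when a '<' occurred since the previous '>',
--     # so: split on '>' and count the pieces (except the trailing one) containing '<'.
--     return sum('<' in piece for piece in infos_attendues.split('>')[:-1])
-- ===== Notes on version B (the rewrite author's own statement) =====
-- stated objective: idiomatic
-- what changed: Replaces the char-by-char state machine (tracking the last '<' index and collecting substrings) with a split on '>' followed by counting the non-final pieces that contain '<'.
import Mathlib
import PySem

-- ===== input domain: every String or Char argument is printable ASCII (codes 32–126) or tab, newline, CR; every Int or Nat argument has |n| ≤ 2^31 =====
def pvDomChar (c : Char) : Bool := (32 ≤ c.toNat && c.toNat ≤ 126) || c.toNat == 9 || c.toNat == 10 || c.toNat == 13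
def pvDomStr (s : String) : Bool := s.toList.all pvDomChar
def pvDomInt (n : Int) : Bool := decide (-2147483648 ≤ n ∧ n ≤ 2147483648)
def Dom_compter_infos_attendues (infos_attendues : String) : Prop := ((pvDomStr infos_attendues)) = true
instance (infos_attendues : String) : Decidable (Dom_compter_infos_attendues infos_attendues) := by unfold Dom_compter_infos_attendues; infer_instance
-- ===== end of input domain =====

-- B replaces A's char-by-char state machine by split-on-'>' and counting pieces containing '<' (idiomatic; return value only, no side effects).

-- ===== PORT A =====
-- state = (champs, start); loop over enumerate(infos_attendues)
def compter_infos_attendues (infos_attendues : String) : Int :=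
  let r := (PySem.List.enumerate infos_attendues.toList).foldl
    (fun (st : List String × Option Int) p =>
      if p.2 == '<' then (st.1, some p.1)
      else if p.2 == '>' && st.2.isSome then
        (st.1 ++ [PySem.Str.slice infos_attendues st.2 (some (p.1 + 1))], none)
      else st)
    ([], none)
  (r.1.length : Int)

-- ===== PORT B =====
-- sum('<' in piece for piece in infos_attendues.split('>')[:-1]); split ported at the Chars level (PySem.Str is a thin wrapper over PySem.Chars)
def compter_infos_attendues_alt (infos_attendues : String) : Int :=
  (PySem.List.slice (PySem.Chars.splitOn infos_attendues.toList ['>']) none (some (-1))).foldl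
    (fun acc piece => acc + (if PySem.Chars.isIn ['<'] piece then 1 else 0)) (0 : Int)

-- ===== PRECONDITION & SPEC =====
def Spec_compter_infos_attendues (infos_attendues : String) (out : Int) : Prop := out = compter_infos_attendues_alt infos_attendues
instance (infos_attendues : String) (out : Int) : Decidable (Spec_compter_infos_attendues infos_attendues out) := by unfold Spec_compter_infos_attendues; infer_instance

-- ===== CLAIM (what is proved, stated in full; the proofs are below) =====
def Claim_equal_compter_infos_attendues : Prop := ∀ (infos_attendues : String), Dom_compter_infos_attendues infos_attendues → Spec_compter_infos_attendues infos_attendues (compter_infos_attendues infos_attendues)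

-- ===== LEMMAS AND PROOFS =====

-- reference count: number of '>' that close a field, b = "a '<' has been seen since the last close"
def pvCountAux (l : List Char) (b : Bool) : Nat :=
  match l with
  | [] => 0
  | c :: t => if c = '>' then (if b then 1 else 0) + pvCountAux t false
              else pvCountAux t (b || c = '<')

-- reference splitter on '>' with a reversed current-piece accumulator
def pvSplit (l : List Char) (cur : List Char) : List (List Char) :=
  match l with
  | [] => [cur.reverse]
  | c :: t => if c = '>' then cur.reverse :: pvSplit t [] else pvSplit t (c :: cur)

theorem pvSplit_ne_nil (l cur : List Char) : pvSplit l cur ≠ [] := by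
  cases l with
  | nil => simp [pvSplit]
  | cons c t => simp only [pvSplit]; split <;> simp [pvSplit_ne_nil t]

theorem pvA_inv (l : List Char) (s : String) :
    ∀ (i : Int) (champs : List String) (start : Option Int),
    ((PySem.List.enumerate l i).foldl
      (fun (st : List String × Option Int) p =>
        if p.2 == '<' then (st.1, some p.1)
        else if p.2 == '>' && st.2.isSome then
          (st.1 ++ [PySem.Str.slice s st.2 (some (p.1 + 1))], none)
        else st)
      (champs, start)).1.length = champs.length + pvCountAux l start.isSome := by
  induction l with
  | nil => intro i champs start; simp [PySem.List.enumerate_nil, pvCountAux]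
  | cons c t ih =>
    intro i champs start
    rw [PySem.List.enumerate_cons, List.foldl_cons]
    by_cases h1 : c = '<'
    · simp only [pvCountAux, h1]
      simp only [if_neg (by decide : ¬('<' : Char) = '>')]
      simpa using ih (i + 1) champs (some i)
    · by_cases h2 : c = '>'
      · cases start with
        | none =>
          simp only [pvCountAux, h2]
          simpa [h1] using ih (i + 1) champs none
        | some j =>
          subst h2
          have := ih (i + 1) (champs ++ [PySem.Str.slice s (some j) (some (i + 1))]) none
          simp [pvCountAux] at this ⊢
          omega
      · have hcl : pvCountAux (c :: t) start.isSome = pvCountAux t start.isSome := by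
          simp [pvCountAux, h1, h2]
        rw [hcl]
        simpa [h1, h2] using ih (i + 1) champs start

theorem pvGo_eq (fuel : Nat) :
    ∀ (l cur : List Char) (acc : List (List Char)), l.length ≤ fuel →
    PySem.Chars.splitOn.go ['>'] fuel l cur acc = acc.reverse ++ pvSplit l cur := by
  induction fuel with
  | zero =>
    intro l cur acc h
    have : l = [] := List.eq_nil_of_length_eq_zero (Nat.le_zero.mp h)
    subst this
    simp [PySem.Chars.splitOn.go, pvSplit]
  | succ n ih =>
    intro l cur acc h
    cases l with
    | nil => simp [PySem.Chars.splitOn.go, pvSplit]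
    | cons c t =>
      rw [PySem.Chars.splitOn.go]
      by_cases hc : c = '>'
      · subst hc
        have hpre : List.isPrefixOf ['>'] ('>' :: t) = true := by simp [List.isPrefixOf]
        rw [hpre, if_pos rfl]
        have hdrop : List.drop (['>'].length) ('>' :: t) = t := by simp
        rw [hdrop, ih t [] (cur.reverse :: acc) (by simpa using Nat.lt_succ_iff.mp (by simpa using h))]
        simp [pvSplit]
      · have hpre : List.isPrefixOf ['>'] (c :: t) = false := by
          simp [List.isPrefixOf]; exact fun hh => (hc hh.symm).elim
        rw [hpre, if_neg (by simp)]
        rw [ih t (c :: cur) acc (by simpa using Nat.lt_succ_iff.mp (by simpa using h))]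
        simp [pvSplit, hc]

theorem pvMem_iff_isIn (p : List Char) : PySem.Chars.isIn ['<'] p = true ↔ '<' ∈ p := by
  rw [PySem.Chars.isIn_iff_infix]
  constructor
  · intro h; exact h.subset (by simp)
  · intro h
    obtain ⟨s1, t1, rfl⟩ := List.append_of_mem h
    exact ⟨s1, t1, by simp⟩

theorem pvCount_split (l : List Char) :
    ∀ (cur : List Char),
    ((pvSplit l cur).dropLast).countP (fun p => PySem.Chars.isIn ['<'] p) = pvCountAux l (decide ('<' ∈ cur)) := by
  induction l with
  | nil => intro cur; simp [pvSplit, pvCountAux]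
  | cons c t ih =>
    intro cur
    by_cases hc : c = '>'
    · subst hc
      have hne := pvSplit_ne_nil t []
      rw [pvSplit, if_pos rfl]
      rw [List.dropLast_cons_of_ne_nil hne, List.countP_cons]
      rw [ih []]
      simp only [pvCountAux]
      by_cases hb : '<' ∈ cur
      · simp [hb, pvMem_iff_isIn, Nat.add_comm]
      · simp [hb, pvMem_iff_isIn]
    · rw [pvSplit, if_neg hc]
      rw [ih (c :: cur)]
      have hbb : (decide ('<' ∈ c :: cur)) = (decide ('<' ∈ cur) || decide (c = '<')) := by
        simp [List.mem_cons, eq_comm, Bool.or_comm]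
      rw [hbb]
      simp [pvCountAux, hc]

theorem pvFoldl_count (ps : List (List Char)) :
    ∀ (acc : Int),
    ps.foldl (fun acc piece => acc + (if PySem.Chars.isIn ['<'] piece then 1 else 0)) acc
      = acc + (ps.countP (fun p => PySem.Chars.isIn ['<'] p) : Nat) := by
  induction ps with
  | nil => intro acc; simp
  | cons p t ih =>
    intro acc
    rw [List.foldl_cons, ih, List.countP_cons]
    by_cases h : PySem.Chars.isIn ['<'] p
    · simp [h]; omega
    · simp [h]

-- ===== VERDICT (by name: the statement is the Claim_ definition above) =====
theorem compter_infos_attendues_spec : Claim_equal_compter_infos_attendues := by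
  intro s _
  unfold Spec_compter_infos_attendues compter_infos_attendues compter_infos_attendues_alt
  rw [PySem.Chars.splitOn, pvGo_eq (s.toList.length + 1) s.toList [] [] (by omega)]
  rw [PySem.List.slice_to_neg_one, pvFoldl_count]
  simp only [List.reverse_nil, List.nil_append]
  rw [pvCount_split s.toList []]
  rw [pvA_inv s.toList s 0 [] none]
  simp
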